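-- pv_equiv track=rewrite | github.com/Raptornythorink/advent-of-code-2023 | 13/13-1.py | row_symetry
-- ===== SOURCE A (Python) =====
-- def row_symetry(pattern: list[str]) -> int:
--     n = len(pattern)
--     for i in range(1, n):
--         mirror_length = min(i, n - i)
--         if pattern[i - mirror_length : i] == list(
--             reversed(pattern[i : i + mirror_length])
--         ):
--             return i
--     return 0
-- ===== SOURCE B (Python) =====
-- def _enc(digits, base):
--     # prefix encodings: fwd[L] = value of the first L digits read left-to-right (base `base`),
--     # rev[L] = value of the first L digits read right-to-left
--     f = 0
--     r = 0
--     p = 1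
--     fwd = [0]
--     rev = [0]
--     for d in digits:
--         f = f * base + d
--         r = r + d * p
--         p = p * base
--         fwd.append(f)
--         rev.append(r)
--     return fwd, rev
--
--
-- def row_symetry(pattern: list[str]) -> int:
--     # Map each distinct row to a small integer id; an axis at i is a palindromic prefix of
--     # length 2*i (when 2*i <= n) or a palindromic suffix of length 2*(n-i) (when 2*i > n),
--     # and a block is a palindrome iff its forward and backward base-`base` encodings
--     # coincide (digits < base, so the encoding is injective).
--     ids = {}
--     digits = []
--     for row in pattern:
--         if row not in ids:
--             ids[row] = len(ids)
--         digits.append(ids[row])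
--     n = len(digits)
--     base = len(ids) + 1
--     fwd, rev = _enc(digits, base)
--     sfwd, srev = _enc(digits[::-1], base)
--     for i in range(1, n):
--         if 2 * i <= n:
--             if fwd[2 * i] == rev[2 * i]:
--                 return i
--         elif sfwd[2 * (n - i)] == srev[2 * (n - i)]:
--             return i
--     return 0
-- ===== Notes on version B (the rewrite author's own statement) =====
-- stated objective: alternative
-- what changed: Replaces the per-axis slice-and-reverse comparison with row interning to integer ids plus precomputed forward/backward positional base-encodings of the prefixes and suffixes, so each candidate axis is decided by a single (big-)integer equality testing the prefix/suffix palindrome property.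
import Mathlib
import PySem

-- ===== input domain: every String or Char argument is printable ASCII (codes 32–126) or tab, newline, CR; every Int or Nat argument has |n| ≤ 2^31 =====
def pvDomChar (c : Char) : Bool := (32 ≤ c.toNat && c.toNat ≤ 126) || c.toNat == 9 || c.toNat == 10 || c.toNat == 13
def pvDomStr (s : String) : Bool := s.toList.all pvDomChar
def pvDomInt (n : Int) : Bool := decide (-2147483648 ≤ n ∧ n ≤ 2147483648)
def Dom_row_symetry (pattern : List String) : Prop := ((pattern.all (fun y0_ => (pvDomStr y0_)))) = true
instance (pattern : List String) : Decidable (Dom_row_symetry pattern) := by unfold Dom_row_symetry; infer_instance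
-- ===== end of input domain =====

-- B replaces A's per-axis slice-and-reverse comparisons by row interning plus precomputed
-- forward/backward positional encodings, deciding each axis with one integer comparison.

-- ===== PORT A =====
def rowSymA_go (pattern : List String) (n : Int) : List Int → Int
  | [] => 0
  | i :: rest =>
      let m := min i (n - i)
      if PySem.List.slice pattern (some (i - m)) (some i)
         = (PySem.List.slice pattern (some i) (some (i + m))).reverse
      then i else rowSymA_go pattern n rest

def row_symetry (pattern : List String) : Int :=
  let n : Int := pattern.length
  rowSymA_go pattern n (PySem.List.pyRange 1 n 1)

-- ===== PORT B =====
-- Source B's _enc loop: state (f, r, p, fwd, rev)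
def encStep (base : Int) (st : Int × Int × Int × List Int × List Int) (d : Int) :
    Int × Int × Int × List Int × List Int :=
  let f := st.1 * base + d
  let r := st.2.1 + d * st.2.2.1
  let p := st.2.2.1 * base
  (f, r, p, st.2.2.2.1 ++ [f], st.2.2.2.2 ++ [r])

def enc (digits : List Int) (base : Int) : List Int × List Int :=
  let st := digits.foldl (encStep base) (0, 0, 1, [0], [0])
  (st.2.2.2.1, st.2.2.2.2)

-- Source B's interning loop: state (ids, digits); `ids.getD row 0` is Python's ids[row]
-- (the key is always present at that point, so the default is never used)
def internStep (st : PySem.Dict String Int × List Int) (row : String) :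
    PySem.Dict String Int × List Int :=
  let ids := if st.1.contains row then st.1 else st.1.insert row (st.1.size : Int)
  (ids, st.2 ++ [ids.getD row 0])

def rowSymB_go (n : Int) (fwd rev sfwd srev : List Int) : List Int → Int
  | [] => 0
  | i :: rest =>
      if 2 * i ≤ n then
        if PySem.List.pyGetD fwd (2 * i) 0 = PySem.List.pyGetD rev (2 * i) 0 then i
        else rowSymB_go n fwd rev sfwd srev rest
      else if PySem.List.pyGetD sfwd (2 * (n - i)) 0 = PySem.List.pyGetD srev (2 * (n - i)) 0 then i
      else rowSymB_go n fwd rev sfwd srev rest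

def row_symetry_alt (pattern : List String) : Int :=
  let st := pattern.foldl internStep (PySem.Dict.empty, [])
  let digits := st.2
  let n : Int := digits.length
  let base : Int := (st.1.size : Int) + 1
  let e := enc digits base
  let se := enc digits.reverse base
  rowSymB_go n e.1 e.2 se.1 se.2 (PySem.List.pyRange 1 n 1)

-- ===== PRECONDITION & SPEC =====
def Spec_row_symetry (pattern : List String) (out : Int) : Prop := out = row_symetry_alt pattern
instance (pattern : List String) (out : Int) : Decidable (Spec_row_symetry pattern out) := by unfold Spec_row_symetry; infer_instance

-- ===== CLAIM (what is proved, stated in full; the proofs are below) =====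
def Claim_equal_row_symetry : Prop := ∀ (pattern : List String), Dom_row_symetry pattern → Spec_row_symetry pattern (row_symetry pattern)

-- ===== LEMMAS AND PROOFS =====

-- horner value of a digit list, most-significant first
def pvHorner (b : Int) (l : List Int) : Int := l.foldl (fun a d => a * b + d) 0

theorem pvHorner_shift (b : Int) : ∀ (l : List Int) (a : Int),
    l.foldl (fun x d => x * b + d) a = a * b ^ l.length + pvHorner b l := by
  intro l
  induction l with
  | nil => intro a; simp [pvHorner]
  | cons d t ih =>
    intro a
    show List.foldl _ (a * b + d) t = _
    rw [ih (a * b + d)]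
    have hc : pvHorner b (d :: t) = (0 * b + d) * b ^ t.length + pvHorner b t := by
      simpa [pvHorner] using ih (0 * b + d)
    rw [List.length_cons, hc]
    ring

theorem pvHorner_cons (b d : Int) (l : List Int) :
    pvHorner b (d :: l) = d * b ^ l.length + pvHorner b l := by
  simpa [pvHorner] using pvHorner_shift b l d

theorem pvHorner_append_singleton (b d : Int) (l : List Int) :
    pvHorner b (l ++ [d]) = pvHorner b l * b + d := by
  simp [pvHorner]

theorem pvHorner_bounds (b : Int) (hb : 0 < b) :
    ∀ (l : List Int), (∀ d ∈ l, 0 ≤ d ∧ d < b) →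
    0 ≤ pvHorner b l ∧ pvHorner b l < b ^ l.length := by
  intro l
  induction l with
  | nil => intro _; simp [pvHorner]
  | cons d t ih =>
    intro h
    have hd := h d (by simp)
    have ht := ih (fun x hx => h x (by simp [hx]))
    have hpow : (0:Int) < b ^ t.length := pow_pos hb _
    rw [pvHorner_cons]
    constructor
    · nlinarith [hd.1, ht.1]
    · simp only [List.length_cons, pow_succ]
      nlinarith [hd.2, ht.2, hd.1, ht.1]

theorem pvHorner_inj (b : Int) (hb : 0 < b) :
    ∀ (l1 l2 : List Int), l1.length = l2.length →
    (∀ d ∈ l1, 0 ≤ d ∧ d < b) → (∀ d ∈ l2, 0 ≤ d ∧ d < b) →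
    pvHorner b l1 = pvHorner b l2 → l1 = l2 := by
  intro l1
  induction l1 with
  | nil => intro l2 hlen _ _ _; cases l2 <;> simp_all
  | cons d t ih =>
    intro l2 hlen h1 h2 heq
    cases l2 with
    | nil => simp at hlen
    | cons e s =>
      have hts : t.length = s.length := by simpa using hlen
      have hd := h1 d (by simp)
      have he := h2 e (by simp)
      have ht := pvHorner_bounds b hb t (fun x hx => h1 x (by simp [hx]))
      have hs := pvHorner_bounds b hb s (fun x hx => h2 x (by simp [hx]))
      rw [pvHorner_cons, pvHorner_cons, hts] at heq
      rw [hts] at ht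
      have hpow : (0:Int) < b ^ s.length := pow_pos hb _
      have hde : d = e := by
        rcases lt_trichotomy d e with h | h | h
        · have h2 : (d + 1) * b ^ s.length ≤ e * b ^ s.length :=
            mul_le_mul_of_nonneg_right (by linarith) (le_of_lt hpow)
          nlinarith [ht.1, ht.2, hs.1, hs.2]
        · exact h
        · have h2 : (e + 1) * b ^ s.length ≤ d * b ^ s.length :=
            mul_le_mul_of_nonneg_right (by linarith) (le_of_lt hpow)
          nlinarith [ht.1, ht.2, hs.1, hs.2]
      subst hde
      have : pvHorner b t = pvHorner b s := by linarith [heq]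
      have := ih s hts (fun x hx => h1 x (by simp [hx])) (fun x hx => h2 x (by simp [hx])) this
      simp [this]

theorem pvHorner_palin (b : Int) (hb : 0 < b) (l : List Int)
    (h : ∀ d ∈ l, 0 ≤ d ∧ d < b) :
    (pvHorner b l = pvHorner b l.reverse) ↔ l = l.reverse := by
  constructor
  · intro he
    exact pvHorner_inj b hb l l.reverse (by simp)
      h (fun d hd => h d (by simpa using hd)) he
  · intro he; rw [← he]

-- half-mirror: a list of length 2k is a palindrome iff its first half is the reverse of its second half
theorem pvHalfIff {α : Type} (P : List α) (k : Nat) (hlen : P.length = 2 * k) :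
    (P.take k = (P.drop k).reverse) ↔ P = P.reverse := by
  have hX : (P.take k).length = k := by simp [hlen]; omega
  have hY : (P.drop k).length = k := by simp [hlen]; omega
  constructor
  · intro h
    conv_lhs => rw [← List.take_append_drop k P]
    rw [← List.take_append_drop k P, List.reverse_append, h]
    simp
  · intro h
    rw [List.reverse_drop, ← h, hlen]
    congr 1
    omega

-- map with a function injective on the elements reflects equality
theorem pvMapInj {α β : Type} (φ : α → β) :
    ∀ (l1 l2 : List α), (∀ a ∈ l1, ∀ a' ∈ l2, φ a = φ a' → a = a') →
    l1.map φ = l2.map φ → l1 = l2 := by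
  intro l1
  induction l1 with
  | nil => intro l2 _ h; cases l2 <;> simp_all
  | cons a t ih =>
    intro l2 hinj h
    cases l2 with
    | nil => simp at h
    | cons a' s =>
      simp only [List.map_cons, List.cons.injEq] at h
      have ha : a = a' := hinj a (by simp) a' (by simp) h.1
      have := ih s (fun x hx y hy => hinj x (by simp [hx]) y (by simp [hy])) h.2
      simp [ha, this]

theorem pvMapPalin {α β : Type} (φ : α → β) (l : List α)
    (hinj : ∀ a ∈ l, ∀ a' ∈ l, φ a = φ a' → a = a') :
    (l.map φ = (l.map φ).reverse) ↔ l = l.reverse := by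
  rw [← List.map_reverse]
  constructor
  · intro h
    exact pvMapInj φ l l.reverse
      (fun x hx y hy => hinj x hx y (by simpa using hy)) h
  · intro h; rw [← h]

def pvEncState (b : Int) (q : List Int) : Int × Int × Int × List Int × List Int :=
  (pvHorner b q, pvHorner b q.reverse, b ^ q.length,
   (List.range (q.length + 1)).map (fun L => pvHorner b (q.take L)),
   (List.range (q.length + 1)).map (fun L => pvHorner b ((q.take L).reverse)))

theorem pvEncStep_state (b : Int) (q : List Int) (d : Int) :
    encStep b (pvEncState b q) d = pvEncState b (q ++ [d]) := by
  have htake : ∀ L, L ≤ q.length → (q ++ [d]).take L = q.take L := by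
    intro L hL
    rw [List.take_append_of_le_length hL]
  have hmap : ∀ (f g : Nat → Int), (∀ L, L ≤ q.length → f L = g L) →
      (List.range (q.length + 1)).map f = (List.range (q.length + 1)).map g := by
    intro f g h
    apply List.map_congr_left
    intro L hL
    exact h L (by simpa using Nat.lt_succ_iff.mp (List.mem_range.mp hL))
  simp only [encStep, pvEncState, Prod.mk.injEq]
  refine ⟨?_, ?_, ?_, ?_, ?_⟩
  · rw [pvHorner_append_singleton]
  · rw [List.reverse_append, List.reverse_singleton]
    show _ = pvHorner b (d :: q.reverse)
    rw [pvHorner_cons, List.length_reverse]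
    ring
  · rw [List.length_append, List.length_singleton, pow_succ]
  · rw [List.length_append, List.length_singleton, List.range_succ (n := q.length + 1),
      List.map_append]
    congr 1
    · exact hmap _ _ (fun L hL => by rw [htake L hL])
    · simp [List.take_of_length_le, pvHorner_append_singleton]
  · rw [List.length_append, List.length_singleton, List.range_succ (n := q.length + 1),
      List.map_append]
    congr 1
    · exact hmap _ _ (fun L hL => by rw [htake L hL])
    · simp only [List.map_cons, List.map_nil]
      rw [List.take_of_length_le (by simp), List.reverse_append, List.reverse_singleton]
      congr 1
      rw [show [d] ++ q.reverse = d :: q.reverse from rfl, pvHorner_cons, List.length_reverse]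
      ring

theorem pvEnc_foldl (b : Int) : ∀ (ds q : List Int),
    ds.foldl (encStep b) (pvEncState b q) = pvEncState b (q ++ ds) := by
  intro ds
  induction ds with
  | nil => intro q; simp
  | cons d t ih =>
    intro q
    rw [List.foldl_cons, pvEncStep_state, ih]
    simp

theorem pvEnc_eq (ds : List Int) (b : Int) :
    enc ds b = ((List.range (ds.length + 1)).map (fun L => pvHorner b (ds.take L)),
                (List.range (ds.length + 1)).map (fun L => pvHorner b ((ds.take L).reverse))) := by
  have h0 : (0, 0, 1, [0], [0]) = pvEncState b [] := by
    simp [pvEncState, pvHorner]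
  rw [enc, h0, pvEnc_foldl]
  simp [pvEncState]

def pvIdsStep (d : PySem.Dict String Int) (row : String) : PySem.Dict String Int :=
  if d.contains row then d else d.insert row (d.size : Int)

def pvIds (ps : List String) : PySem.Dict String Int := ps.foldl pvIdsStep PySem.Dict.empty

theorem pvIntern_fst : ∀ (ps : List String) (st : PySem.Dict String Int × List Int),
    (ps.foldl internStep st).1 = ps.foldl pvIdsStep st.1 := by
  intro ps
  induction ps with
  | nil => intro st; rfl
  | cons r t ih => intro st; exact ih _

theorem pvIds_append (ps : List String) (r : String) :
    pvIds (ps ++ [r]) = pvIdsStep (pvIds ps) r := by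
  rw [pvIds, List.foldl_append]; rfl

theorem pvIds_keys_of_items (ps : List String)
    (h : (pvIds ps).items = (PySem.Set.ofList ps).zipIdx.map (fun p => (p.1, (p.2 : Int)))) :
    (pvIds ps).keys = PySem.Set.ofList ps := by
  show (pvIds ps).items.map Prod.fst = _
  rw [h, List.map_map]
  have he : (Prod.fst ∘ fun p : String × Nat => (p.1, (p.2 : Int))) = Prod.fst := rfl
  rw [he, List.zipIdx_map_fst]

theorem pvIds_items : ∀ (ps : List String),
    (pvIds ps).items = (PySem.Set.ofList ps).zipIdx.map (fun p => (p.1, (p.2 : Int))) := by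
  intro ps
  induction ps using List.reverseRecOn with
  | nil => rfl
  | append_singleton ps r ih =>
    have hkeys := pvIds_keys_of_items ps ih
    rw [pvIds_append, PySem.Set.ofList_append_singleton, pvIdsStep]
    by_cases hm : r ∈ ps
    · have hc : (pvIds ps).contains r = true := by
        rw [PySem.Dict.contains_iff_mem_keys, hkeys]
        exact (PySem.Set.mem_ofList ps r).mpr hm
      rw [hc, if_pos rfl, PySem.Set.add_of_mem ((PySem.Set.mem_ofList ps r).mpr hm), ih]
    · have hc : (pvIds ps).contains r = false := by
        rw [Bool.eq_false_iff]
        intro hcc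
        have := (PySem.Dict.contains_iff_mem_keys _ _).mp hcc
        rw [hkeys] at this
        exact hm ((PySem.Set.mem_ofList ps r).mp this)
      rw [hc]
      simp only [Bool.false_eq_true, if_false]
      rw [PySem.Dict.items_insert_of_not_contains _ _ hc,
        PySem.Set.add_of_not_mem (fun hx => hm ((PySem.Set.mem_ofList ps r).mp hx)),
        List.zipIdx_append, List.map_append, ih]
      have hsize : (pvIds ps).size = (PySem.Set.ofList ps).length := by
        show (pvIds ps).items.length = _
        rw [ih, List.length_map, List.length_zipIdx]
      simp [hsize]

theorem pvIds_keys (ps : List String) : (pvIds ps).keys = PySem.Set.ofList ps :=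
  pvIds_keys_of_items ps (pvIds_items ps)

theorem pvIds_contains (ps : List String) (r : String) :
    (pvIds ps).contains r = true ↔ r ∈ ps := by
  rw [PySem.Dict.contains_iff_mem_keys, pvIds_keys, PySem.Set.mem_ofList]

theorem pvIds_getD_spec (ps : List String) (r : String) (h : r ∈ ps) :
    ∃ j : Nat, (PySem.Set.ofList ps)[j]? = some r ∧
      j < (PySem.Set.ofList ps).length ∧ (pvIds ps).getD r 0 = (j : Int) := by
  have hm : r ∈ PySem.Set.ofList ps := (PySem.Set.mem_ofList ps r).mpr h
  obtain ⟨j, hj, hget⟩ := List.getElem_of_mem hm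
  refine ⟨j, by simp [hj, hget], hj, ?_⟩
  have hz : (r, j) ∈ (PySem.Set.ofList ps).zipIdx := by
    rw [List.mem_zipIdx_iff_getElem?]
    simp [hj, hget]
  have hit : (r, (j : Int)) ∈ (pvIds ps).items := by
    rw [pvIds_items]
    exact List.mem_map.mpr ⟨(r, j), hz, rfl⟩
  exact PySem.Dict.getD_of_mem_items _ hit (by rw [pvIds_keys]; exact PySem.Set.nodup_ofList ps) 0

theorem pvIds_getD_bounds (ps : List String) (r : String) (h : r ∈ ps) :
    0 ≤ (pvIds ps).getD r 0 ∧ (pvIds ps).getD r 0 < ((pvIds ps).size : Int) := by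
  obtain ⟨j, _, hjlt, hval⟩ := pvIds_getD_spec ps r h
  have hsize : (pvIds ps).size = (PySem.Set.ofList ps).length := by
    show (pvIds ps).items.length = _
    rw [pvIds_items, List.length_map, List.length_zipIdx]
  rw [hval, hsize]
  exact ⟨Int.natCast_nonneg j, by exact_mod_cast hjlt⟩

theorem pvIds_getD_inj (ps : List String) (r1 r2 : String) (h1 : r1 ∈ ps) (h2 : r2 ∈ ps)
    (he : (pvIds ps).getD r1 0 = (pvIds ps).getD r2 0) : r1 = r2 := by
  obtain ⟨j1, hg1, _, hv1⟩ := pvIds_getD_spec ps r1 h1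
  obtain ⟨j2, hg2, _, hv2⟩ := pvIds_getD_spec ps r2 h2
  rw [hv1, hv2] at he
  have : j1 = j2 := by exact_mod_cast he
  subst this
  rw [hg1] at hg2
  exact Option.some_inj.mp hg2

theorem pvIds_getD_persist (ps : List String) (r r' : String) (h : r' ∈ ps) :
    (pvIds (ps ++ [r])).getD r' 0 = (pvIds ps).getD r' 0 := by
  rw [pvIds_append, pvIdsStep]
  by_cases hc : (pvIds ps).contains r = true
  · rw [hc, if_pos rfl]
  · have hcf : (pvIds ps).contains r = false := Bool.eq_false_iff.mpr hc
    rw [hcf]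
    simp only [Bool.false_eq_true, if_false]
    have hne : r' ≠ r := by
      intro hrr
      exact hc ((pvIds_contains ps r).mpr (hrr ▸ h))
    exact PySem.Dict.getD_insert_of_ne _ _ _ hne

theorem pvIntern_snd : ∀ (ps : List String),
    (ps.foldl internStep (PySem.Dict.empty, [])).2 = ps.map (fun r => (pvIds ps).getD r 0) := by
  intro ps
  induction ps using List.reverseRecOn with
  | nil => rfl
  | append_singleton ps r ih =>
    rw [List.foldl_append]
    have hfst : (ps.foldl internStep (PySem.Dict.empty, [])).1 = pvIds ps := by
      rw [pvIntern_fst]; rfl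
    have hstep : internStep (ps.foldl internStep (PySem.Dict.empty, [])) r
        = (pvIds (ps ++ [r]),
           (ps.foldl internStep (PySem.Dict.empty, [])).2 ++ [(pvIds (ps ++ [r])).getD r 0]) := by
      simp only [internStep, hfst, pvIds_append, pvIdsStep]
    rw [List.foldl_cons, List.foldl_nil, hstep, List.map_append, ih]
    show _ ++ _ = _ ++ _
    congr 1
    apply List.map_congr_left
    intro r' hr'
    exact (pvIds_getD_persist ps r r' hr').symm

-- index into an enc-produced table
theorem pvGetEnc (f : Nat → Int) (N k : Nat) (hk : k ≤ N) :
    PySem.List.pyGetD ((List.range (N + 1)).map f) ((k : Nat) : Int) 0 = f k := by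
  rw [PySem.List.pyGetD_natCast]
  simp [List.getD, Nat.lt_succ_of_le hk]

-- A's slice condition, prefix case, as a palindrome statement
theorem pvA_pref {α : Type} [DecidableEq α] (ps : List α) (k : Nat) (h2k : 2 * k ≤ ps.length) :
    (PySem.List.slice ps (some ((k : Int) - min (k : Int) ((ps.length : Int) - (k : Int)))) (some (k : Int))
       = (PySem.List.slice ps (some (k : Int)) (some ((k : Int) + min (k : Int) ((ps.length : Int) - (k : Int))))).reverse)
    ↔ (ps.take (2 * k) = (ps.take (2 * k)).reverse) := by
  have hmin : min (k : Int) ((ps.length : Int) - (k : Int)) = (k : Int) := by omega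
  rw [hmin]
  have h0 : (k : Int) - (k : Int) = ((0 : Nat) : Int) := by omega
  have h2 : (k : Int) + (k : Int) = ((2 * k : Nat) : Int) := by omega
  rw [h0, h2, PySem.List.slice_natCast, PySem.List.slice_natCast]
  simp only [List.drop_zero, Nat.sub_zero]
  have hP : (ps.take (2 * k)).length = 2 * k := by simp; omega
  have hX : (ps.take (2 * k)).take k = ps.take k := by rw [List.take_take]; congr 1; omega
  have hY : (ps.take (2 * k)).drop k = (ps.drop k).take (2 * k - k) := List.drop_take
  have := pvHalfIff (ps.take (2 * k)) k hP
  rw [hX, hY] at this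
  exact this

-- A's slice condition, suffix case, as a palindrome of a prefix of the reversed list
theorem pvA_suf {α : Type} [DecidableEq α] (ps : List α) (k : Nat) (hkN : k < ps.length)
    (h2k : ps.length < 2 * k) :
    (PySem.List.slice ps (some ((k : Int) - min (k : Int) ((ps.length : Int) - (k : Int)))) (some (k : Int))
       = (PySem.List.slice ps (some (k : Int)) (some ((k : Int) + min (k : Int) ((ps.length : Int) - (k : Int))))).reverse)
    ↔ (ps.reverse.take (2 * (ps.length - k)) = (ps.reverse.take (2 * (ps.length - k))).reverse) := by
  set N := ps.length with hN
  set j := N - k with hj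
  have hmin : min (k : Int) ((N : Int) - (k : Int)) = (N : Int) - (k : Int) := by omega
  rw [hmin]
  have ha : (k : Int) - ((N : Int) - (k : Int)) = ((k - j : Nat) : Int) := by
    omega
  have hb : (k : Int) + ((N : Int) - (k : Int)) = ((N : Nat) : Int) := by omega
  rw [ha, hb, PySem.List.slice_natCast, PySem.List.slice_natCast]
  have hfull : (ps.drop k).take (N - k) = ps.drop k := by
    apply List.take_of_length_le; simp; omega
  rw [hfull]
  set a := k - j with hA
  have hQlen : (ps.drop a).length = 2 * j := by simp; omega
  have hQtake : (ps.drop a).take j = (ps.drop a).take (k - a) := by congr 1; omega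
  have hQdrop : (ps.drop a).drop j = ps.drop k := by rw [List.drop_drop]; congr 1; omega
  have hhalf := pvHalfIff (ps.drop a) j hQlen
  rw [hQtake, hQdrop] at hhalf
  have hrev : ps.reverse.take (2 * j) = (ps.drop a).reverse := by
    rw [List.reverse_drop]; congr 1; omega
  rw [hhalf, hrev, List.reverse_reverse]
  exact eq_comm

def pvDigits (ps : List String) : List Int := ps.map (fun r => (pvIds ps).getD r 0)

def pvBase (ps : List String) : Int := ((pvIds ps).size : Int) + 1

theorem pvBase_pos (ps : List String) : 0 < pvBase ps := by
  have : (0:Int) ≤ ((pvIds ps).size : Int) := Int.natCast_nonneg _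
  unfold pvBase; omega

theorem pvDigits_length (ps : List String) : (pvDigits ps).length = ps.length := by
  simp [pvDigits]

-- a palindrome test on mapped digits is a palindrome test on the rows
theorem pvHornerBridge (ps : List String) (l : List String) (hsub : ∀ x ∈ l, x ∈ ps) :
    (pvHorner (pvBase ps) (l.map (fun r => (pvIds ps).getD r 0))
       = pvHorner (pvBase ps) ((l.map (fun r => (pvIds ps).getD r 0)).reverse))
    ↔ l = l.reverse := by
  have hb := pvBase_pos ps
  have hbd : ∀ d ∈ l.map (fun r => (pvIds ps).getD r 0), 0 ≤ d ∧ d < pvBase ps := by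
    intro d hd
    obtain ⟨r, hr, hrd⟩ := List.mem_map.mp hd
    obtain ⟨h0, h1⟩ := pvIds_getD_bounds ps r (hsub r hr)
    rw [← hrd]; unfold pvBase; omega
  rw [pvHorner_palin _ hb _ hbd]
  exact pvMapPalin _ l (fun a ha a' ha' => pvIds_getD_inj ps a a' (hsub a ha) (hsub a' ha'))

theorem pvCond_iff (ps : List String) (i : Int) (h1 : 1 ≤ i) (h2 : i < (ps.length : Int)) :
    (PySem.List.slice ps (some (i - min i ((ps.length : Int) - i))) (some i)
       = (PySem.List.slice ps (some i) (some (i + min i ((ps.length : Int) - i)))).reverse)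
    ↔ (if 2 * i ≤ ((pvDigits ps).length : Int)
       then PySem.List.pyGetD (enc (pvDigits ps) (pvBase ps)).1 (2 * i) 0
              = PySem.List.pyGetD (enc (pvDigits ps) (pvBase ps)).2 (2 * i) 0
       else PySem.List.pyGetD (enc (pvDigits ps).reverse (pvBase ps)).1 (2 * (((pvDigits ps).length : Int) - i)) 0
              = PySem.List.pyGetD (enc (pvDigits ps).reverse (pvBase ps)).2 (2 * (((pvDigits ps).length : Int) - i)) 0) := by
  have hNd := pvDigits_length ps
  set N := ps.length with hN
  obtain ⟨k, rfl⟩ : ∃ k : Nat, i = (k : Int) := ⟨i.toNat, by omega⟩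
  have hk1 : 1 ≤ k := by exact_mod_cast h1
  have hkN : k < N := by exact_mod_cast h2
  rw [pvEnc_eq, hNd]
  by_cases h2k : 2 * k ≤ N
  · rw [if_pos (by omega)]
    have hcast : 2 * (k : Int) = ((2 * k : Nat) : Int) := by omega
    rw [hcast, pvGetEnc _ _ _ (by omega), pvGetEnc _ _ _ (by omega)]
    rw [pvA_pref ps k (by omega)]
    have htk : (pvDigits ps).take (2 * k) = (ps.take (2 * k)).map (fun r => (pvIds ps).getD r 0) := by
      rw [pvDigits, ← List.map_take]
    rw [htk]
    exact (pvHornerBridge ps (ps.take (2 * k)) (fun x hx => List.mem_of_mem_take hx)).symm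
  · rw [if_neg (by omega)]
    set j := N - k with hj
    have hrl : ((pvDigits ps).reverse).length = N := by simp [hNd]
    rw [pvEnc_eq, hrl]
    have hcast : 2 * ((N : Int) - (k : Int)) = ((2 * j : Nat) : Int) := by omega
    rw [hcast, pvGetEnc _ _ _ (by omega), pvGetEnc _ _ _ (by omega)]
    rw [pvA_suf ps k hkN (by omega)]
    have htk : (pvDigits ps).reverse.take (2 * j)
        = (ps.reverse.take (2 * j)).map (fun r => (pvIds ps).getD r 0) := by
      rw [pvDigits, ← List.map_reverse, ← List.map_take]
    rw [htk]
    exact (pvHornerBridge ps (ps.reverse.take (2 * j))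
      (fun x hx => List.mem_reverse.mp (List.mem_of_mem_take hx))).symm

theorem pvGo_congr (ps : List String) (n : Int) (fwd rev sfwd srev : List Int) :
    ∀ (L : List Int),
    (∀ i ∈ L,
      ((PySem.List.slice ps (some (i - min i (n - i))) (some i)
         = (PySem.List.slice ps (some i) (some (i + min i (n - i)))).reverse)
       ↔ (if 2 * i ≤ n
          then PySem.List.pyGetD fwd (2 * i) 0 = PySem.List.pyGetD rev (2 * i) 0
          else PySem.List.pyGetD sfwd (2 * (n - i)) 0 = PySem.List.pyGetD srev (2 * (n - i)) 0))) →
    rowSymA_go ps n L = rowSymB_go n fwd rev sfwd srev L := by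
  intro L
  induction L with
  | nil => intro _; rfl
  | cons i rest ih =>
    intro h
    have hi := h i (by simp)
    have hrest := ih (fun x hx => h x (by simp [hx]))
    have hA : rowSymA_go ps n (i :: rest)
        = if PySem.List.slice ps (some (i - min i (n - i))) (some i)
             = (PySem.List.slice ps (some i) (some (i + min i (n - i)))).reverse
          then i else rowSymA_go ps n rest := rfl
    have hB : rowSymB_go n fwd rev sfwd srev (i :: rest)
        = if 2 * i ≤ n then
            (if PySem.List.pyGetD fwd (2 * i) 0 = PySem.List.pyGetD rev (2 * i) 0 then i
             else rowSymB_go n fwd rev sfwd srev rest)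
          else (if PySem.List.pyGetD sfwd (2 * (n - i)) 0 = PySem.List.pyGetD srev (2 * (n - i)) 0 then i
             else rowSymB_go n fwd rev sfwd srev rest) := rfl
    rw [hA, hB]
    by_cases h2 : 2 * i ≤ n
    · rw [if_pos h2] at hi
      rw [if_pos h2]
      by_cases hc : PySem.List.pyGetD fwd (2 * i) 0 = PySem.List.pyGetD rev (2 * i) 0
      · rw [if_pos (hi.mpr hc), if_pos hc]
      · rw [if_neg (fun hx => hc (hi.mp hx)), if_neg hc]
        exact hrest
    · rw [if_neg h2] at hi
      rw [if_neg h2]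
      by_cases hc : PySem.List.pyGetD sfwd (2 * (n - i)) 0 = PySem.List.pyGetD srev (2 * (n - i)) 0
      · rw [if_pos (hi.mpr hc), if_pos hc]
      · rw [if_neg (fun hx => hc (hi.mp hx)), if_neg hc]
        exact hrest

theorem pvMain (ps : List String) : row_symetry ps = row_symetry_alt ps := by
  have hfst : (ps.foldl internStep (PySem.Dict.empty, [])).1 = pvIds ps := by
    rw [pvIntern_fst]; rfl
  have hsnd : (ps.foldl internStep (PySem.Dict.empty, [])).2 = pvDigits ps := pvIntern_snd ps
  have hB : row_symetry_alt ps
      = rowSymB_go (((ps.foldl internStep (PySem.Dict.empty, [])).2.length : Int))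
          (enc (ps.foldl internStep (PySem.Dict.empty, [])).2
            (((ps.foldl internStep (PySem.Dict.empty, [])).1.size : Int) + 1)).1
          (enc (ps.foldl internStep (PySem.Dict.empty, [])).2
            (((ps.foldl internStep (PySem.Dict.empty, [])).1.size : Int) + 1)).2
          (enc (ps.foldl internStep (PySem.Dict.empty, [])).2.reverse
            (((ps.foldl internStep (PySem.Dict.empty, [])).1.size : Int) + 1)).1
          (enc (ps.foldl internStep (PySem.Dict.empty, [])).2.reverse
            (((ps.foldl internStep (PySem.Dict.empty, [])).1.size : Int) + 1)).2
          (PySem.List.pyRange 1 ((ps.foldl internStep (PySem.Dict.empty, [])).2.length : Int) 1) := rfl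
  have hA : row_symetry ps = rowSymA_go ps (ps.length : Int) (PySem.List.pyRange 1 (ps.length : Int) 1) := rfl
  have hbase : ((pvIds ps).size : Int) + 1 = pvBase ps := rfl
  have hlen : ((pvDigits ps).length : Int) = (ps.length : Int) := by rw [pvDigits_length]
  rw [hA, hB, hsnd, hfst, hbase, hlen]
  apply pvGo_congr
  intro i hi
  obtain ⟨h1, h2⟩ := (PySem.List.mem_pyRange_one).mp hi
  have := pvCond_iff ps i h1 h2
  rw [hlen] at this
  exact this

-- ===== VERDICT (by name: the statement is the Claim_ definition above) =====
theorem row_symetry_spec : Claim_equal_row_symetry := by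
  intro pattern _
  show row_symetry pattern = row_symetry_alt pattern
  exact pvMain pattern
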